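-- pv_equiv track=rewrite | github.com/lamartine-sl/public | golf_press_project.py | calc_press
-- ===== SOURCE A (Python) =====
-- def calc_press(p1, p2):
--     games = [0]
--     result = [0 if p1 == p2 else 1 if p1 < p2 else -1 for p1, p2 in zip(p1,p2)]
--     for x in result:
--         games = [x + y for y in games]
--         if abs(games[len(games)-1]) > 1:
--             games += [0]
--     return games
-- ===== SOURCE B (Python) =====
-- def calc_press(p1, p2):
--     # One pass, O(n): record the running hole-total at each press start;
--     # final value of each press game = final total minus its start total.
--     total = 0
--     starts = [0]
--     for a, b in zip(p1, p2):
--         total += 0 if a == b else 1 if a < b else -1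
--         if abs(total - starts[-1]) > 1:
--             starts.append(total)
--     return [total - s for s in starts]
-- ===== Notes on version B (the rewrite author's own statement) =====
-- stated objective: faster
-- what changed: Instead of rewriting every press game on each hole (O(n*presses)), B keeps one running total and the total at each press start, emitting each game's value as final total minus its start total in a single pass.
import Mathlib
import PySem

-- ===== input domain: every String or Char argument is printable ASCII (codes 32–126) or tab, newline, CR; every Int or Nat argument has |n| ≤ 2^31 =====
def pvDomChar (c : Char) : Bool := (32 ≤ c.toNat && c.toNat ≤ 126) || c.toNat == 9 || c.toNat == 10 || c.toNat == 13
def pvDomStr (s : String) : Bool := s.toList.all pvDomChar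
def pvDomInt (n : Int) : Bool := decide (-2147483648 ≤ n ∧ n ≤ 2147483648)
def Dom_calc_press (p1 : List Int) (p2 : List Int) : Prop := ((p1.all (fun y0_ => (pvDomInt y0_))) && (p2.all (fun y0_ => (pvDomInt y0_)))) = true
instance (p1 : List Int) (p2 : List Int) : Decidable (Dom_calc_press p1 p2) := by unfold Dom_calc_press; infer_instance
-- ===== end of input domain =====

-- ===== PORT A =====
-- A rewrites every open press game on each hole; `games[len(games)-1]` is ported via
-- pyGet? (always in range since games is nonempty, so getD 0 is never used).
def calc_press (p1 : List Int) (p2 : List Int) : List Int :=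
  let result := (p1.zip p2).map (fun pq => if pq.1 == pq.2 then 0 else if pq.1 < pq.2 then 1 else -1)
  result.foldl (fun games x =>
    let games := games.map (fun y => x + y)
    if |((PySem.List.pyGet? games ((games.length : Int) - 1)).getD 0)| > 1 then games ++ [(0 : Int)]
    else games) [0]

-- ===== PORT B =====
-- B: one pass keeping the running total and the total at each press start.
def calc_press_alt (p1 : List Int) (p2 : List Int) : List Int :=
  let st := (p1.zip p2).foldl (fun (st : Int × List Int) pq =>
    let t := st.1 + (if pq.1 == pq.2 then 0 else if pq.1 < pq.2 then 1 else -1)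
    if |t - st.2.getLastD 0| > 1 then (t, st.2 ++ [t]) else (t, st.2)) (0, [0])
  st.2.map (fun s => st.1 - s)

-- ===== PRECONDITION & SPEC =====
def Spec_calc_press (p1 : List Int) (p2 : List Int) (out : List Int) : Prop := out = calc_press_alt p1 p2
instance (p1 : List Int) (p2 : List Int) (out : List Int) : Decidable (Spec_calc_press p1 p2 out) := by unfold Spec_calc_press; infer_instance

-- ===== CLAIM (what is proved, stated in full; the proofs are below) =====
def Claim_equal_calc_press : Prop := ∀ (p1 : List Int) (p2 : List Int), Dom_calc_press p1 p2 → Spec_calc_press p1 p2 (calc_press p1 p2)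

-- ===== LEMMAS AND PROOFS =====

-- step functions, named for the induction
def pvStepA (games : List Int) (x : Int) : List Int :=
  let games := games.map (fun y => x + y)
  if |((PySem.List.pyGet? games ((games.length : Int) - 1)).getD 0)| > 1 then games ++ [(0 : Int)]
  else games

def pvStepB (st : Int × List Int) (x : Int) : Int × List Int :=
  let t := st.1 + x
  if |t - st.2.getLastD 0| > 1 then (t, st.2 ++ [t]) else (t, st.2)

theorem pv_pyGet_last (l : List Int) (h : l ≠ []) :
    ((PySem.List.pyGet? l ((l.length : Int) - 1)).getD 0) = l.getLastD 0 := by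
  have hl : 0 < l.length := List.length_pos_iff.mpr h
  have hcast : ((l.length : Int) - 1) = ((l.length - 1 : Nat) : Int) := by omega
  rw [hcast, PySem.List.pyGet?_natCast, ← List.getLast?_eq_getElem?, List.getLastD_eq_getLast?]

theorem pv_getLastD_map_sub (l : List Int) (c : Int) (hl : l ≠ []) :
    (l.map (fun s => c - s)).getLastD 0 = c - l.getLastD 0 := by
  rcases List.exists_cons_of_ne_nil hl with ⟨a, u, rfl⟩
  rw [List.getLastD_eq_getLast?, List.getLastD_eq_getLast?, List.getLast?_map]
  cases hh : (a :: u).getLast? with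
  | none => simp at hh
  | some v => simp

theorem pv_invariant (r : List Int) (t : Int) (starts : List Int) (h : starts ≠ []) :
    r.foldl pvStepA (starts.map (fun s => t - s)) =
      (r.foldl pvStepB (t, starts)).2.map (fun s => (r.foldl pvStepB (t, starts)).1 - s) := by
  induction r generalizing t starts with
  | nil => simp
  | cons x rest ih =>
    have hmap : (starts.map (fun s => t - s)).map (fun y => x + y)
        = starts.map (fun s => (t + x) - s) := by
      rw [List.map_map]
      apply List.map_congr_left
      intro a _
      show x + (t - a) = t + x - a
      ring
    have hstepA : pvStepA (starts.map (fun s => t - s)) x =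
        (if |(t + x) - starts.getLastD 0| > 1
          then (starts ++ [t + x]).map (fun s => (t + x) - s)
          else starts.map (fun s => (t + x) - s)) := by
      unfold pvStepA
      simp only [hmap]
      rw [pv_pyGet_last _ (by simp [h]), pv_getLastD_map_sub _ _ h]
      split_ifs with hc
      · simp
      · rfl
    have hstepB : pvStepB (t, starts) x =
        (if |(t + x) - starts.getLastD 0| > 1 then (t + x, starts ++ [t + x])
          else (t + x, starts)) := by
      rfl
    simp only [List.foldl_cons]
    rw [hstepA, hstepB]
    split_ifs with hc
    · exact ih (t + x) (starts ++ [t + x]) (by simp)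
    · exact ih (t + x) starts h

-- ===== VERDICT (by name: the statement is the Claim_ definition above) =====
theorem calc_press_spec : Claim_equal_calc_press := by
  intro p1 p2 _
  unfold Spec_calc_press calc_press calc_press_alt
  have key := pv_invariant
    ((p1.zip p2).map (fun pq => if pq.1 == pq.2 then (0 : Int) else if pq.1 < pq.2 then 1 else -1))
    0 [0] (by simp)
  have h0 : (([0] : List Int).map (fun s => (0 : Int) - s)) = [0] := by norm_num
  rw [h0] at key
  exact key.trans (by rw [List.foldl_map]; simp only [pvStepB])
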